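-- pv_equiv track=rewrite | github.com/zhiqihu0708/AIx_Anomaly_Detection | recipe_analysis_report.py | detect_looped_steps
-- ===== SOURCE A (Python) =====
-- from collections import defaultdict
--
-- def detect_looped_steps(step_info):
--     """{ run_id: set_of_step_names_appearing_more_than_once }"""
--     looped = {}
--     for rid, bounds in step_info.items():
--         cnt = defaultdict(int)
--         for b in bounds:
--             if b["step_name"]:
--                 cnt[b["step_name"]] += 1
--         looped[rid] = {n for n, c in cnt.items() if c > 1}
--     return looped
-- ===== SOURCE B (Python) =====
-- def detect_looped_steps(step_info):
--     """{ run_id: set_of_step_names_appearing_more_than_once }"""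
--     looped = {}
--     for rid, bounds in step_info.items():
--         seen, dups = set(), set()
--         rest = [b["step_name"] for b in bounds if b["step_name"]]
--         while rest:
--             n, rest = rest[0], rest[1:]
--             if n not in seen:
--                 seen.add(n)
--                 if n in rest:          # recurs later -> looped
--                     dups.add(n)
--         looped[rid] = dups
--     return looped
-- ===== Notes on version B (the rewrite author's own statement) =====
-- stated objective: alternative
-- what changed: A tallies every occurrence in a per-run count dict and then filters names with count > 1; B never counts: it consumes the name list head/tail as a worklist and, at each name's first occurrence, decides it is looped by a single membership look-ahead into the remaining names, maintaining only seen/dups sets (trades A's O(n) tally for a quadratic look-ahead scan).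
import Mathlib
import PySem

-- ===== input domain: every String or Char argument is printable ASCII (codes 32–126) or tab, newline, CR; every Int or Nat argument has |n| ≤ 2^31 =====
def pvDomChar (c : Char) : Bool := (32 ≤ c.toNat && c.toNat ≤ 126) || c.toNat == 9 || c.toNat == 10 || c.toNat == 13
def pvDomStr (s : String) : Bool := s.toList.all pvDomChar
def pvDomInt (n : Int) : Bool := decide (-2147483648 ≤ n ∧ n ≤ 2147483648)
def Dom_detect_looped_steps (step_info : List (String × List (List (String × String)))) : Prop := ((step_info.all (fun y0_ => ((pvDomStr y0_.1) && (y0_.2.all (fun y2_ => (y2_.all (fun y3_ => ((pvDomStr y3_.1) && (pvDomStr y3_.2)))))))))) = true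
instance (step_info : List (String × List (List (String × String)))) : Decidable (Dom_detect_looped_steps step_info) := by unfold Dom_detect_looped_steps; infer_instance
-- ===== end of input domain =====

-- B replaces A's count-then-filter by a worklist sweep that detects each looped name at its
-- first occurrence via a look-ahead membership test (objective: alternative; not faster).

-- ===== PORT A =====
-- b["step_name"] (Pre_ guarantees the key exists; on a missing key Python raises KeyError)
def pvBoundName (b : List (String × String)) : String := (PySem.Dict.mk b).getD "step_name" ""

def detect_looped_steps (step_info : List (String × List (List (String × String)))) : List (String × List String) :=
  let looped := step_info.foldl (fun d r =>
    let cnt : PySem.Dict String Int := r.2.foldl (fun c b =>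
      if pvBoundName b ≠ "" then c.modify (pvBoundName b) 0 (· + 1) else c) PySem.Dict.empty
    d.insert r.1 (PySem.Set.ofList ((cnt.items.filter (fun p => p.2 > 1)).map Prod.fst)))
    PySem.Dict.empty
  looped.items

-- ===== PORT B =====
-- the 'while rest: n, rest = rest[0], rest[1:] …' worklist loop of Source B
def pvRepLoop : List String → PySem.Set String → PySem.Set String → PySem.Set String
  | [], _, dups => dups
  | n :: rest, seen, dups =>
    if n ∈ seen then pvRepLoop rest seen dups
    else pvRepLoop rest (PySem.Set.add seen n)
           (if n ∈ rest then PySem.Set.add dups n else dups)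

def detect_looped_steps_alt (step_info : List (String × List (List (String × String)))) : List (String × List String) :=
  let looped := step_info.foldl (fun d r =>
    let rest := r.2.filterMap (fun b => if pvBoundName b ≠ "" then some (pvBoundName b) else none)
    d.insert r.1 (pvRepLoop rest PySem.Set.empty PySem.Set.empty))
    PySem.Dict.empty
  looped.items

-- ===== PRECONDITION & SPEC =====
-- Pre_ excludes bounds that lack the "step_name" key (there A raises KeyError) and association
-- lists with duplicate keys, which do not faithfully represent a Python dict (the dict collapses them).
def Pre_detect_looped_steps (step_info : List (String × List (List (String × String)))) : Prop :=
  (step_info.map Prod.fst).Nodup ∧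
  ∀ r ∈ step_info, ∀ b ∈ r.2, (b.map Prod.fst).Nodup ∧ "step_name" ∈ b.map Prod.fst
instance (step_info : List (String × List (List (String × String)))) : Decidable (Pre_detect_looped_steps step_info) := by unfold Pre_detect_looped_steps; infer_instance

def pvWitness_detect_looped_steps : (List (String × List (List (String × String)))) :=
  [("run1", [[("step_name", "a")], [("step_name", "a")], [("step_name", "b")]]), ("run2", [])]

def Spec_detect_looped_steps (step_info : List (String × List (List (String × String)))) (out : List (String × List String)) : Prop := out = detect_looped_steps_alt step_info
instance (step_info : List (String × List (List (String × String)))) (out : List (String × List String)) : Decidable (Spec_detect_looped_steps step_info out) := by unfold Spec_detect_looped_steps; infer_instance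

-- ===== CLAIM (what is proved, stated in full; the proofs are below) =====
def Claim_equal_detect_looped_steps : Prop := ∀ (step_info : List (String × List (List (String × String)))), Dom_detect_looped_steps step_info → Pre_detect_looped_steps step_info → Spec_detect_looped_steps step_info (detect_looped_steps step_info)

-- ===== LEMMAS AND PROOFS =====

theorem pv_ofList_append (l : List String) (x : String) :
    PySem.Set.ofList (l ++ [x]) = if x ∈ l then PySem.Set.ofList l else PySem.Set.ofList l ++ [x] := by
  simp only [PySem.Set.ofList_eq_foldl, List.foldl_append, List.foldl_cons, List.foldl_nil]
  rw [← PySem.Set.ofList_eq_foldl]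
  unfold PySem.Set.add
  by_cases hx : x ∈ l
  · simp [PySem.Set.mem_ofList, hx]
  · simp [PySem.Set.mem_ofList, hx]

theorem pv_ofList_nodup (l : List String) (h : l.Nodup) : PySem.Set.ofList l = l := by
  induction l using List.reverseRecOn with
  | nil => rfl
  | append_singleton l x ih =>
    have hnd : l.Nodup := (List.nodup_append.mp h).1
    have hx : x ∉ l := by
      simp only [List.nodup_append] at h
      intro hm
      exact (h.2.2 x hm x (List.mem_singleton_self x)) rfl
    rw [pv_ofList_append, if_neg hx, ih hnd]

-- A's counting loop over the bounds is the counting loop over the extracted truthy names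
theorem pv_count_fold_eq (bounds : List (List (String × String))) (c : PySem.Dict String Int) :
    bounds.foldl (fun c b =>
      if pvBoundName b ≠ "" then c.modify (pvBoundName b) 0 (· + 1) else c) c
    = (bounds.filterMap (fun b => if pvBoundName b ≠ "" then some (pvBoundName b) else none)).foldl
        (fun c x => c.modify x 0 (· + 1)) c := by
  induction bounds generalizing c with
  | nil => rfl
  | cons b bs ih =>
    simp only [List.foldl_cons, List.filterMap_cons]
    by_cases h : pvBoundName b = ""
    · simpa [h] using ih c
    · simpa [h] using ih (c.modify (pvBoundName b) 0 (· + 1))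

-- A's inner result, characterised: the distinct names (first occurrences) with count > 1
theorem pv_A_inner (names : List String) :
    PySem.Set.ofList
      (((((names.foldl (fun (c : PySem.Dict String Int) x => c.modify x 0 (· + 1))
          PySem.Dict.empty).items.filter (fun p => p.2 > 1)).map Prod.fst)))
    = (PySem.Set.ofList names).filter (fun n => decide (1 < List.count n names)) := by
  rw [← PySem.Dict.counter_eq_foldl, PySem.Dict.items_counter]
  rw [List.filter_map, List.map_map]
  have h1 : ((fun p : String × Int => decide (p.2 > 1)) ∘ fun k => (k, ((List.count k names : Nat) : Int)))
      = fun n => decide (1 < List.count n names) := by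
    funext k; simp [Nat.one_lt_cast]
  rw [h1]
  have h2 : (Prod.fst ∘ fun k : String => (k, ((List.count k names : Nat) : Int))) = id := rfl
  rw [h2, List.map_id]
  exact pv_ofList_nodup _ ((PySem.Set.nodup_ofList names).filter _)

-- invariant of B's worklist sweep: after consuming 'pre', seen is set(pre) and dups is
-- exactly the distinct names of pre that occur more than once in the whole list
theorem pv_rep_inv (L : List String) :
    ∀ (rest pre : List String), pre ++ rest = L →
    pvRepLoop rest (PySem.Set.ofList pre)
        ((PySem.Set.ofList pre).filter (fun n => decide (1 < List.count n L)))
    = (PySem.Set.ofList L).filter (fun n => decide (1 < List.count n L)) := by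
  intro rest
  induction rest with
  | nil => intro pre h; simp at h; subst h; rfl
  | cons n rest' ih =>
    intro pre h
    by_cases hn : n ∈ pre
    · have hseen : n ∈ PySem.Set.ofList pre := (PySem.Set.mem_ofList pre n).mpr hn
      have hsame : PySem.Set.ofList (pre ++ [n]) = PySem.Set.ofList pre := by
        rw [pv_ofList_append, if_pos hn]
      have := ih (pre ++ [n]) (by simpa using h)
      rw [hsame] at this
      simpa [pvRepLoop, hseen] using this
    · have hseen : n ∉ PySem.Set.ofList pre := fun hm => hn ((PySem.Set.mem_ofList pre n).mp hm)
      have hofl : PySem.Set.ofList (pre ++ [n]) = PySem.Set.ofList pre ++ [n] := by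
        rw [pv_ofList_append, if_neg hn]
      have hadd : PySem.Set.add (PySem.Set.ofList pre) n = PySem.Set.ofList (pre ++ [n]) := by
        rw [hofl]; unfold PySem.Set.add
        simp [PySem.Set.mem_ofList, hn]
      -- count of n in L: n not in pre, head occurrence contributes 1
      have hcnt : List.count n L = 1 + List.count n rest' := by
        rw [← h, List.count_append, List.count_cons_self, List.count_eq_zero.mpr hn]; omega
      have hP : (decide (1 < List.count n L) = true) ↔ n ∈ rest' := by
        rw [decide_eq_true_iff, hcnt]
        constructor
        · intro h1; exact List.count_pos_iff.mp (by omega)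
        · intro hm; have := List.count_pos_iff.mpr hm; omega
      have hdnot : n ∉ (PySem.Set.ofList pre).filter (fun n => decide (1 < List.count n L)) :=
        fun hm => hseen (List.mem_of_mem_filter hm)
      have hdups : (if n ∈ rest' then
            PySem.Set.add ((PySem.Set.ofList pre).filter (fun n => decide (1 < List.count n L))) n
          else (PySem.Set.ofList pre).filter (fun n => decide (1 < List.count n L)))
          = (PySem.Set.ofList (pre ++ [n])).filter (fun n => decide (1 < List.count n L)) := by
        rw [hofl, List.filter_append]
        by_cases hm : n ∈ rest'
        · rw [if_pos hm]
          unfold PySem.Set.add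
          simp only [List.filter_cons, List.filter_nil, hP.mpr hm]
          simp [PySem.Set.contains, hdnot]
        · rw [if_neg hm]
          have : decide (1 < List.count n L) = false := by
            rw [decide_eq_false_iff_not]; intro hgt; exact hm (hP.mp (decide_eq_true hgt))
          simp [this]
      have := ih (pre ++ [n]) (by simpa using h)
      rw [← hdups, ← hadd] at this
      simpa [pvRepLoop, hseen] using this

-- B's inner result equals the same characterisation
theorem pv_B_inner (names : List String) :
    pvRepLoop names PySem.Set.empty PySem.Set.empty
    = (PySem.Set.ofList names).filter (fun n => decide (1 < List.count n names)) := by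
  simpa using pv_rep_inv names names [] rfl

theorem pv_inner_eq (bounds : List (List (String × String))) :
    PySem.Set.ofList
      ((((bounds.foldl (fun (c : PySem.Dict String Int) b =>
            if pvBoundName b ≠ "" then c.modify (pvBoundName b) 0 (· + 1) else c)
          PySem.Dict.empty).items.filter (fun p => p.2 > 1)).map Prod.fst))
    = pvRepLoop (bounds.filterMap (fun b => if pvBoundName b ≠ "" then some (pvBoundName b) else none))
        PySem.Set.empty PySem.Set.empty := by
  rw [pv_count_fold_eq, pv_A_inner, pv_B_inner]

theorem pv_fold_eq (si : List (String × List (List (String × String)))) :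
    si.foldl (fun (d : PySem.Dict String (List String)) r =>
      d.insert r.1 (PySem.Set.ofList
        ((((r.2.foldl (fun (c : PySem.Dict String Int) b =>
              if pvBoundName b ≠ "" then c.modify (pvBoundName b) 0 (· + 1) else c)
            PySem.Dict.empty).items.filter (fun p => p.2 > 1)).map Prod.fst)))) PySem.Dict.empty
    = si.foldl (fun (d : PySem.Dict String (List String)) r =>
      d.insert r.1 (pvRepLoop
        (r.2.filterMap (fun b => if pvBoundName b ≠ "" then some (pvBoundName b) else none))
        PySem.Set.empty PySem.Set.empty)) PySem.Dict.empty := by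
  induction si using List.reverseRecOn with
  | nil => rfl
  | append_singleton l r ih =>
    simp only [List.foldl_append, List.foldl_cons, List.foldl_nil]
    rw [ih, pv_inner_eq]

-- ===== VERDICT (by name: the statement is the Claim_ definition above) =====
theorem detect_looped_steps_spec : Claim_equal_detect_looped_steps := by
  intro step_info _ _
  unfold Spec_detect_looped_steps detect_looped_steps detect_looped_steps_alt
  exact congrArg PySem.Dict.items (pv_fold_eq step_info)
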